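-- pv_equiv track=rewrite | github.com/saxenapriyansh/GSO-Path-Planning | GSO/removeLoops.py | removeLoops
-- ===== SOURCE A (Python) =====
-- def removeLoops(Paths):
--     path = Paths
--     psize = len(Paths)
--     i=0
--     while(i<psize):
--         cur = path[i]
--         for j in range(i+1, psize):
--             if(cur == path[j]):
--                 path[i:j] = ()
--                 psize = len(path)
--                 break
--         i= i+1
--     return path
-- ===== SOURCE B (Python) =====
-- def removeLoops(Paths):
--     # Note: A mutates Paths in place; B only builds a new list (return value is identical).
--     n = len(Paths)
--     nxt = [None] * n
--     last = {}
--     for p in range(n - 1, -1, -1):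
--         v = Paths[p]
--         nxt[p] = last.get(v)
--         last[v] = p
--     out = []
--     p = 0
--     while p < n:
--         out.append(Paths[p])
--         q = nxt[p]
--         p = q + 1 if q is not None else p + 1
--     return out
-- ===== Notes on version B (the rewrite author's own statement) =====
-- stated objective: faster
-- what changed: Replaces the in-place quadratic delete-and-rescan loop by one right-to-left dict pass precomputing each index's next equal-value occurrence, then a single pointer-jump pass building the output list.
import Mathlib
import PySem

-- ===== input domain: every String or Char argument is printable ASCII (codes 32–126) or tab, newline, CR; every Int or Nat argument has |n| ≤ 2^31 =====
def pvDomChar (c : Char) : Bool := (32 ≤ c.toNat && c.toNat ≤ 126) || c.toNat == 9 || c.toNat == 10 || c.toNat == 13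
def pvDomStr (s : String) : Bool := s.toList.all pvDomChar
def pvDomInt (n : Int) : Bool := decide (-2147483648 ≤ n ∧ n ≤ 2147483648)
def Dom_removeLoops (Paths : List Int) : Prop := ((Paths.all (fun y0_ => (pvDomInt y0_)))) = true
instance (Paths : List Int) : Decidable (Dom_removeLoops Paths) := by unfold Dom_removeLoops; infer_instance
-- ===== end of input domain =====

-- B replaces A's in-place quadratic delete-and-rescan loop by a precomputed next-occurrence
-- table plus one pointer-jump pass; equivalence is about the RETURN value only (A mutates its
-- argument in place, B does not).

-- ===== PORT A =====
-- inner 'for j in range(i+1, psize): if cur == path[j]: break' — first matching j, if any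
-- (rem = psize - j counts the remaining range elements, making the scan structural)
def findJA (path : List Int) (cur : Int) : Nat → Nat → Option Nat
  | 0, _ => none
  | rem + 1, j => if cur == path.getD j 0 then some j else findJA path cur rem (j + 1)

-- the outer while loop; 'path[i:j] = ()' becomes take i ++ drop j; fuel = initial psize only
-- makes the recursion total (i grows and psize never grows, so ≤ psize iterations happen)
def removeLoopsLoop : Nat → List Int → Nat → List Int
  | 0, path, _ => path
  | fuel + 1, path, i =>
    if i < path.length then
      match findJA path (path.getD i 0) (path.length - (i + 1)) (i + 1) with
      | some j => removeLoopsLoop fuel (path.take i ++ path.drop j) (i + 1)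
      | none => removeLoopsLoop fuel path (i + 1)
    else path

def removeLoops (Paths : List Int) : List Int :=
  removeLoopsLoop Paths.length Paths 0

-- ===== PORT B =====
-- right-to-left pass p = n-1 … 0: nxt[p] = last.get(v); last[v] = p  (acc collects nxt front-first)
def buildNxt (Paths : List Int) : Nat → PySem.Dict Int Nat → List (Option Nat) → List (Option Nat)
  | 0, _, acc => acc
  | p + 1, last, acc =>
    let v := Paths.getD p 0
    buildNxt Paths p (last.insert v p) ((last.get? v) :: acc)

-- the 'while p < n' pointer-jump loop; fuel = n only makes the recursion total (p strictly
-- increases each iteration, so the fuel is never exhausted while p < n)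
def walkB (Paths : List Int) (nxt : List (Option Nat)) : Nat → Nat → List Int
  | 0, _ => []
  | fuel + 1, p =>
    if p < Paths.length then
      Paths.getD p 0 ::
        (match nxt.getD p none with
         | some q => walkB Paths nxt fuel (q + 1)
         | none => walkB Paths nxt fuel (p + 1))
    else []

def removeLoops_alt (Paths : List Int) : List Int :=
  walkB Paths (buildNxt Paths Paths.length PySem.Dict.empty []) Paths.length 0

-- ===== PRECONDITION & SPEC =====
def Spec_removeLoops (Paths : List Int) (out : List Int) : Prop := out = removeLoops_alt Paths
instance (Paths : List Int) (out : List Int) : Decidable (Spec_removeLoops Paths out) := by unfold Spec_removeLoops; infer_instance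

-- ===== CLAIM (what is proved, stated in full; the proofs are below) =====
def Claim_equal_removeLoops : Prop := ∀ (Paths : List Int), Dom_removeLoops Paths → Spec_removeLoops Paths (removeLoops Paths)

-- ===== LEMMAS AND PROOFS =====

-- reference function: keep the current element, jump past its first later duplicate
def walkFrom : List Int → List Int
  | [] => []
  | v :: rest =>
    v :: (match rest.findIdx? (fun x => v == x) with
      | some k => walkFrom (rest.drop (k + 1))
      | none => walkFrom rest)
termination_by l => l.length
decreasing_by
  · simp only [List.length_drop, List.length_cons]; omega
  · simp

-- A's inner scan over pre ++ l from index pre.length finds the first match in l, shifted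
theorem findJA_eq (cur : Int) : ∀ (l pre : List Int),
    findJA (pre ++ l) cur l.length pre.length
      = (l.findIdx? (fun x => cur == x)).map (· + pre.length) := by
  intro l
  induction l with
  | nil => intro pre; simp [findJA]
  | cons x l' ih =>
    intro pre
    have hget : (pre ++ x :: l').getD pre.length 0 = x := by
      simp [List.getD]
    rw [List.length_cons, findJA, hget, List.findIdx?_cons]
    by_cases hx : cur == x
    · simp [hx]
    · rw [if_neg (by simpa using hx), if_neg (by simpa using hx),
        show pre ++ x :: l' = (pre ++ [x]) ++ l' by simp,
        show pre.length + 1 = (pre ++ [x]).length by simp, ih (pre ++ [x])]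
      simp only [Option.map_map, Function.comp_def, List.length_append, List.length_cons,
        List.length_nil]
      cases l'.findIdx? (fun x => cur == x) with
      | none => simp
      | some k => simp; omega

-- A's outer loop, run on pre ++ tail at index pre.length with enough fuel, keeps pre and
-- walks tail
theorem loopA_eq : ∀ (fuel : Nat) (tail pre : List Int), tail.length ≤ fuel →
    removeLoopsLoop fuel (pre ++ tail) pre.length = pre ++ walkFrom tail := by
  intro fuel
  induction fuel with
  | zero =>
    intro tail pre h
    have : tail = [] := List.eq_nil_of_length_eq_zero (by omega)
    subst this
    simp [removeLoopsLoop, walkFrom]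
  | succ fuel ih =>
    intro tail pre h
    cases tail with
    | nil => rw [removeLoopsLoop]; simp [walkFrom]
    | cons v rest =>
      have hlt : pre.length < (pre ++ v :: rest).length := by simp
      have hget : (pre ++ v :: rest).getD pre.length 0 = v := by
        simp [List.getD]
      have hrem : (pre ++ v :: rest).length - (pre.length + 1) = rest.length := by
        simp
        omega
      have hfind : findJA (pre ++ v :: rest) v ((pre ++ v :: rest).length - (pre.length + 1))
            (pre.length + 1)
          = (rest.findIdx? (fun x => v == x)).map (· + (pre ++ [v]).length) := by
        rw [hrem, show pre ++ v :: rest = (pre ++ [v]) ++ rest by simp,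
          show pre.length + 1 = (pre ++ [v]).length by simp, findJA_eq]
      rw [removeLoopsLoop, if_pos hlt, hget, hfind]
      cases hk : rest.findIdx? (fun x => v == x) with
      | some k =>
        have hklen : k < rest.length := (List.findIdx?_eq_some_iff_getElem.mp hk).1
        have hvk : (v == rest[k]) = true := by
          have := (List.findIdx?_eq_some_iff_getElem.mp hk).2.1
          simpa using this
        have hdropk : rest.drop k = v :: rest.drop (k + 1) := by
          rw [List.drop_eq_getElem_cons hklen]
          congr 1
          exact (eq_of_beq hvk).symm
        have htake : (pre ++ v :: rest).take pre.length = pre := by simp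
        have hdrop : (pre ++ v :: rest).drop (k + (pre ++ [v]).length) = rest.drop k := by
          rw [show pre ++ v :: rest = (pre ++ [v]) ++ rest by simp, List.drop_append]
          have h1 : (pre ++ [v]).drop (k + (pre ++ [v]).length) = [] :=
            List.drop_eq_nil_of_le (by omega)
          have h2 : k + (pre ++ [v]).length - (pre ++ [v]).length = k := by omega
          rw [h1, h2, List.nil_append]
        simp only [Option.map_some]
        rw [htake, hdrop, hdropk,
          show pre ++ v :: rest.drop (k + 1) = (pre ++ [v]) ++ rest.drop (k + 1) by simp,
          show pre.length + 1 = (pre ++ [v]).length by simp,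
          ih (rest.drop (k + 1)) (pre ++ [v]) (by simp [List.length_drop] at *; omega)]
        rw [walkFrom]
        simp [hk]
      | none =>
        simp only [Option.map_none]
        rw [show pre ++ v :: rest = (pre ++ [v]) ++ rest by simp,
          show pre.length + 1 = (pre ++ [v]).length by simp,
          ih rest (pre ++ [v]) (by simp at h; omega)]
        rw [walkFrom]
        simp [hk]

-- the next-occurrence entry we expect at index q
def nxtSpec (Paths : List Int) (q : Nat) : Option Nat :=
  ((Paths.drop (q + 1)).findIdx? (fun x => Paths.getD q 0 == x)).map (· + (q + 1))

-- the right-to-left dict pass computes exactly the next-occurrence table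
theorem buildNxt_eq (Paths : List Int) : ∀ (p : Nat) (last : PySem.Dict Int Nat)
    (acc : List (Option Nat)), p ≤ Paths.length →
    (∀ v : Int, last.get? v = ((Paths.drop p).findIdx? (fun x => v == x)).map (· + p)) →
    buildNxt Paths p last acc = ((List.range p).map (nxtSpec Paths)) ++ acc := by
  intro p
  induction p with
  | zero => intro last acc _ _; simp [buildNxt]
  | succ p ih =>
    intro last acc hple hinv
    rw [buildNxt]
    have hp : p < Paths.length := by omega
    have hdp : Paths.drop p = Paths.getD p 0 :: Paths.drop (p + 1) := by
      rw [List.drop_eq_getElem_cons hp]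
      congr 1
      simp [List.getD, List.getElem?_eq_getElem hp]
    have hinv' : ∀ v : Int, (last.insert (Paths.getD p 0) p).get? v
        = ((Paths.drop p).findIdx? (fun x => v == x)).map (· + p) := by
      intro v
      rw [PySem.Dict.get?_insert, hdp, List.findIdx?_cons]
      by_cases hv : v = Paths.getD p 0
      · simp [hv]
      · rw [if_neg hv, if_neg (by simpa using hv), hinv v]
        simp only [Option.map_map, Function.comp_def]
        cases (Paths.drop (p + 1)).findIdx? (fun x => v == x) with
        | none => simp
        | some k => simp; omega
    rw [ih _ _ (by omega) hinv', List.range_succ, hinv]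
    simp [nxtSpec]

-- the pointer-jump loop with a correct table equals the reference walk
theorem walkB_eq (Paths : List Int) (nxt : List (Option Nat))
    (hn : ∀ p, p < Paths.length → nxt.getD p none = nxtSpec Paths p) :
    ∀ (fuel p : Nat), Paths.length ≤ fuel + p →
      walkB Paths nxt fuel p = walkFrom (Paths.drop p) := by
  intro fuel
  induction fuel with
  | zero =>
    intro p hfp
    rw [walkB, List.drop_eq_nil_of_le (by omega), walkFrom]
  | succ fuel ih =>
    intro p hfp
    rw [walkB]
    by_cases hp : p < Paths.length
    · have hdp : Paths.drop p = Paths.getD p 0 :: Paths.drop (p + 1) := by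
        rw [List.drop_eq_getElem_cons hp]
        congr 1
        simp [List.getD, List.getElem?_eq_getElem hp]
      rw [if_pos hp, hn p hp, hdp, walkFrom]
      rw [nxtSpec]
      cases hk : (Paths.drop (p + 1)).findIdx? (fun x => Paths.getD p 0 == x) with
      | none => simp only [Option.map_none]; rw [ih (p + 1) (by omega)]
      | some k =>
        simp only [Option.map_some]
        rw [ih (k + (p + 1) + 1) (by omega), List.drop_drop,
          show p + 1 + (k + 1) = k + (p + 1) + 1 by omega]
    · rw [if_neg hp, List.drop_eq_nil_of_le (by omega), walkFrom]

-- ===== VERDICT (by name: the statement is the Claim_ definition above) =====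
theorem removeLoops_spec : Claim_equal_removeLoops := by
  intro Paths _
  unfold Spec_removeLoops removeLoops removeLoops_alt
  have hA : removeLoopsLoop Paths.length Paths 0 = walkFrom Paths := by
    have := loopA_eq Paths.length Paths [] (le_refl _)
    simpa using this
  have hbuild : buildNxt Paths Paths.length PySem.Dict.empty []
      = (List.range Paths.length).map (nxtSpec Paths) := by
    rw [buildNxt_eq Paths Paths.length PySem.Dict.empty [] (le_refl _) (by
      intro v
      rw [PySem.Dict.get?_empty, List.drop_length]
      simp)]
    simp
  have hB : walkB Paths (buildNxt Paths Paths.length PySem.Dict.empty []) Paths.length 0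
      = walkFrom Paths := by
    rw [hbuild]
    have := walkB_eq Paths ((List.range Paths.length).map (nxtSpec Paths)) (by
      intro p hp
      simp [List.getD, hp]) Paths.length 0 (by omega)
    simpa using this
  rw [hA, hB]
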